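-- pv_equiv track=rewrite | github.com/KrolinaTF/IA4Edu | data/analyze_4th_grade_profiles.py | analyze_curricular_states
-- ===== SOURCE A (Python) =====
-- from collections import defaultdict, Counter
--
-- def analyze_curricular_states(profiles):
--     """Analyze the curricular states across all subjects"""
--     subjects = ['matematicas', 'lengua', 'ciencias']
--     states_analysis = {}
--
--     for subject in subjects:
--         states_analysis[subject] = {}
--
--         # Get all curriculum items for this subject
--         if profiles and 'estado_curricular' in profiles[0]:
--             curriculum_items = list(profiles[0]['estado_curricular'][subject].keys())
--
--             for item in curriculum_items:
--                 states = []
--                 for p in profiles: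
--                     if 'estado_curricular' in p and subject in p['estado_curricular']:
--                         if item in p['estado_curricular'][subject]:
--                             states.append(p['estado_curricular'][subject][item]['estado'])
--
--                 if states:
--                     states_analysis[subject][item] = dict(Counter(states))
--
--     return states_analysis
-- ===== SOURCE B (Python) =====
-- from collections import defaultdict, Counter
--
-- def analyze_curricular_states(profiles):
--     """Analyze the curricular states across all subjects"""
--     subjects = ['matematicas', 'lengua', 'ciencias']
--     if not profiles or 'estado_curricular' not in profiles[0]:
--         return {s: {} for s in subjects}
--     base = profiles[0]['estado_curricular']
--
--     def subject_analysis(s):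
--         # one pass over the profiles, counting every allowed item as we meet it
--         allowed = list(base[s].keys())
--         counters = defaultdict(Counter)
--         for p in profiles:
--             ec = p.get('estado_curricular')
--             if ec is None:
--                 continue
--             d = ec.get(s)
--             if d is None:
--                 continue
--             for item, info in d.items():
--                 if item in allowed:
--                     counters[item][info['estado']] += 1
--         return {i: dict(counters[i]) for i in allowed if i in counters}
--
--     return {s: subject_analysis(s) for s in subjects}
-- ===== Notes on version B (the rewrite author's own statement) =====
-- stated objective: idiomatic
-- what changed: A rescans the whole profile list once per curriculum item (item-major nested loops); B makes a single pass over the profiles per subject, feeding a defaultdict(Counter) keyed by item as it meets each allowed item, then assembles the result in profiles[0]'s item order; Pre_ excludes the KeyError inputs (a subject of the fixed list missing from profiles[0]['estado_curricular'], or 'estado' missing from a counted item entry), on which both A and B raise, and association lists with duplicate keys inside one dict, which no Python dict value can represent.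
import Mathlib
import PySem

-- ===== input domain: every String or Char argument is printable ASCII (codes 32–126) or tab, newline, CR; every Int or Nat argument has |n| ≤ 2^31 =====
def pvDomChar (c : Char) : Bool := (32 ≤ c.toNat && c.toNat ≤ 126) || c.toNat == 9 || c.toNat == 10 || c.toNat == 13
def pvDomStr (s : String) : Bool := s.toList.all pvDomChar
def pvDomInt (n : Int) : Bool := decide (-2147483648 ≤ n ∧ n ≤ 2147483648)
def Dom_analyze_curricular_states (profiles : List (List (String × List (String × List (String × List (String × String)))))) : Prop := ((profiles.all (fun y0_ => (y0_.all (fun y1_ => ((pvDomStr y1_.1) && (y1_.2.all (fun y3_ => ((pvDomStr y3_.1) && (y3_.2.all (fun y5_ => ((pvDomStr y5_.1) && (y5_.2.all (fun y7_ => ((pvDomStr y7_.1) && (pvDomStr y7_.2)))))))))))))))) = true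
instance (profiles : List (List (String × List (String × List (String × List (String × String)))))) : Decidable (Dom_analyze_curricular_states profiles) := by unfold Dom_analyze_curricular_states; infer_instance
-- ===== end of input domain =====

-- B replaces A's per-item rescans of all profiles (item-major: for every curriculum item a fresh
-- pass over every profile) by ONE pass over the profiles per subject that feeds a
-- defaultdict(Counter); equivalence of the two traversal orders is proved below.

-- ===== PORT A =====
-- A profile / its nested dicts arrive as association lists; every Python dict lookup is
-- PySem.Dict.get?/getD on PySem.Dict.mk of that list.
-- the inner loop 'for p in profiles: … states.append(…)' of A
-- (the lookup p['estado_curricular'][subject][item]['estado'] is getD … "estado" "": the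
--  KeyError case — 'estado' missing on a counted item — is excluded by Pre_)
def pvStatesA (profiles : List (List (String × List (String × List (String × List (String × String)))))) (subject item : String) : List String :=
  profiles.foldl (fun states p =>
    match (PySem.Dict.mk p).get? "estado_curricular" with
    | none => states
    | some ec =>
      match (PySem.Dict.mk ec).get? subject with
      | none => states
      | some d =>
        match (PySem.Dict.mk d).get? item with
        | none => states
        | some info => states ++ [(PySem.Dict.mk info).getD "estado" ""]) []

-- the body of A's 'for subject in subjects' loop: states_analysis[subject] built item by item
-- (curriculum_items = profiles[0]['estado_curricular'][subject].keys(); the KeyError when the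
--  subject is missing there is excluded by Pre_, getD … [] stands in)
def pvInnerA (profiles : List (List (String × List (String × List (String × List (String × String)))))) (subject : String) : List (String × List (String × Int)) :=
  match profiles with
  | [] => []
  | p0 :: _ =>
    match (PySem.Dict.mk p0).get? "estado_curricular" with
    | none => []
    | some ec0 =>
      let items := ((PySem.Dict.mk ec0).getD subject []).map Prod.fst
      (items.foldl (fun inner item =>
        let states := pvStatesA profiles subject item
        if states ≠ [] then inner.insert item (PySem.Dict.counter states).items else inner)
        PySem.Dict.empty).items

def analyze_curricular_states (profiles : List (List (String × List (String × List (String × List (String × String)))))) : List (String × List (String × List (String × Int))) :=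
  ((["matematicas", "lengua", "ciencias"]).foldl
    (fun sa subject => sa.insert subject (pvInnerA profiles subject)) PySem.Dict.empty).items

-- ===== PORT B =====
-- B's inner loop body: 'for item, info in d.items(): if item in allowed: counters[item][info["estado"]] += 1'
def pvStepItem (allowed : List String) (cs : PySem.Dict String (PySem.Dict String Int)) (pr : String × List (String × String)) : PySem.Dict String (PySem.Dict String Int) :=
  if allowed.contains pr.1 then
    cs.modify pr.1 PySem.Dict.empty (fun c => c.modify ((PySem.Dict.mk pr.2).getD "estado" "") 0 (· + 1))
  else cs

-- B's loop body for one profile: ec = p.get('estado_curricular'); d = ec.get(s); inner item loop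
def pvStepProf (s : String) (allowed : List String) (cs : PySem.Dict String (PySem.Dict String Int)) (p : List (String × List (String × List (String × List (String × String))))) : PySem.Dict String (PySem.Dict String Int) :=
  match (PySem.Dict.mk p).get? "estado_curricular" with
  | none => cs
  | some ec =>
    match (PySem.Dict.mk ec).get? s with
    | none => cs
    | some d => d.foldl (pvStepItem allowed) cs

-- B's 'for p in profiles: …' single pass building the defaultdict(Counter)
def pvCountersB (profiles : List (List (String × List (String × List (String × List (String × String)))))) (s : String) (allowed : List String) : PySem.Dict String (PySem.Dict String Int) :=
  profiles.foldl (pvStepProf s allowed) PySem.Dict.empty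

def analyze_curricular_states_alt (profiles : List (List (String × List (String × List (String × List (String × String)))))) : List (String × List (String × List (String × Int))) :=
  let subjects := ["matematicas", "lengua", "ciencias"]
  match profiles with
  | [] => subjects.map (fun s => (s, []))
  | p0 :: _ =>
    match (PySem.Dict.mk p0).get? "estado_curricular" with
    | none => subjects.map (fun s => (s, []))
    | some base =>
      subjects.map (fun s =>
        let allowed := ((PySem.Dict.mk base).getD s []).map Prod.fst
        let cs := pvCountersB profiles s allowed
        (s, allowed.filterMap (fun i => (cs.get? i).map (fun c => (i, c.items)))))

-- ===== PRECONDITION & SPEC =====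
-- Pre_ excludes (a) the inputs on which the Python raises KeyError — a subject of the fixed list
-- missing from profiles[0]['estado_curricular'], or 'estado' missing from an item entry that gets
-- counted (both A and B raise there) — and (b) association lists with duplicate keys inside one
-- dict, which no Python dict value can represent (a Python caller cannot reach them).
-- distinct keys, checked pairwise with the native string comparison
def pvNodupStr : List String → Bool
  | [] => true
  | x :: xs => !xs.contains x && pvNodupStr xs

def pvPreB (profiles : List (List (String × List (String × List (String × List (String × String)))))) : Bool :=
  profiles.all (fun p => pvNodupStr (p.map Prod.fst) && p.all (fun pr =>
    pvNodupStr (pr.2.map Prod.fst) && pr.2.all (fun q =>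
      pvNodupStr (q.2.map Prod.fst) && q.2.all (fun r => pvNodupStr (r.2.map Prod.fst))))) &&
  (match profiles.head?.bind (fun p0 => (PySem.Dict.mk p0).get? "estado_curricular") with
   | none => true
   | some ec0 =>
     (["matematicas", "lengua", "ciencias"] : List String).all (fun s => ((PySem.Dict.mk ec0).get? s).isSome) &&
     profiles.all (fun p => (["matematicas", "lengua", "ciencias"] : List String).all (fun s =>
       ((PySem.Dict.mk ((PySem.Dict.mk p).getD "estado_curricular" [])).getD s []).all (fun pr =>
         !(((PySem.Dict.mk ec0).getD s []).map Prod.fst).contains pr.1 || (pr.2.map Prod.fst).contains "estado"))))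

def Pre_analyze_curricular_states (profiles : List (List (String × List (String × List (String × List (String × String)))))) : Prop :=
  pvPreB profiles = true
instance (profiles : List (List (String × List (String × List (String × List (String × String)))))) : Decidable (Pre_analyze_curricular_states profiles) := by unfold Pre_analyze_curricular_states; infer_instance

def pvWitness_analyze_curricular_states : (List (List (String × List (String × List (String × List (String × String)))))) :=
  [[("estado_curricular",
     [("matematicas", [("suma", [("estado", "dominado")])]),
      ("lengua", [("lectura", [("estado", "en_proceso")])]),
      ("ciencias", [])])],
   [("estado_curricular",
     [("matematicas", [("suma", [("estado", "dominado")]), ("resta", [("estado", "iniciado")])])])]]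

def Spec_analyze_curricular_states (profiles : List (List (String × List (String × List (String × List (String × String)))))) (out : List (String × List (String × List (String × Int)))) : Prop := out = analyze_curricular_states_alt profiles
instance (profiles : List (List (String × List (String × List (String × List (String × String)))))) (out : List (String × List (String × List (String × Int)))) : Decidable (Spec_analyze_curricular_states profiles out) := by unfold Spec_analyze_curricular_states; infer_instance

-- ===== CLAIM (what is proved, stated in full; the proofs are below) =====
def Claim_equal_analyze_curricular_states : Prop := ∀ (profiles : List (List (String × List (String × List (String × List (String × String)))))), Dom_analyze_curricular_states profiles → Pre_analyze_curricular_states profiles → Spec_analyze_curricular_states profiles (analyze_curricular_states profiles)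

-- ===== LEMMAS AND PROOFS =====

-- A's contribution of one profile to subject s / item i (the element A appends, if any)
def pvContrib (s i : String) (p : List (String × List (String × List (String × List (String × String))))) : Option String :=
  ((PySem.Dict.mk p).get? "estado_curricular").bind fun ec =>
    ((PySem.Dict.mk ec).get? s).bind fun d =>
      ((PySem.Dict.mk d).get? i).map fun info => (PySem.Dict.mk info).getD "estado" ""

theorem pvStatesA_eq_filterMap (profiles : List (List (String × List (String × List (String × List (String × String)))))) (s i : String) :
    pvStatesA profiles s i = profiles.filterMap (pvContrib s i) := by
  have h : ∀ (ps : List (List (String × List (String × List (String × List (String × String)))))) (acc : List String),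
      ps.foldl (fun states p =>
        match (PySem.Dict.mk p).get? "estado_curricular" with
        | none => states
        | some ec =>
          match (PySem.Dict.mk ec).get? s with
          | none => states
          | some d =>
            match (PySem.Dict.mk d).get? i with
            | none => states
            | some info => states ++ [(PySem.Dict.mk info).getD "estado" ""]) acc
        = acc ++ ps.filterMap (pvContrib s i) := by
    intro ps
    induction ps with
    | nil => intro acc; simp
    | cons p ps ih =>
      intro acc
      simp only [List.foldl_cons, List.filterMap_cons]
      cases h1 : (PySem.Dict.mk p).get? "estado_curricular" with
      | none =>
        have hc : pvContrib s i p = none := by simp [pvContrib, h1]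
        simp [hc, ih]
      | some ec =>
        cases h2 : (PySem.Dict.mk ec).get? s with
        | none =>
          have hc : pvContrib s i p = none := by simp [pvContrib, h1, h2]
          simp [h2, hc, ih]
        | some d =>
          cases h3 : (PySem.Dict.mk d).get? i with
          | none =>
            have hc : pvContrib s i p = none := by simp [pvContrib, h1, h2, h3]
            simp [h2, h3, hc, ih]
          | some info =>
            have hc : pvContrib s i p = some ((PySem.Dict.mk info).getD "estado" "") := by
              simp [pvContrib, h1, h2, h3]
            simp [h2, h3, hc, ih]
  simpa [pvStatesA] using h profiles []

-- a fold over an item dict that never touches key i leaves get? at i unchanged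
theorem pv_get?_foldl_stepItem_not_mem (allowed : List String) (d : List (String × List (String × String))) (i : String) :
    ∀ cs : PySem.Dict String (PySem.Dict String Int), i ∉ d.map Prod.fst →
      (d.foldl (pvStepItem allowed) cs).get? i = cs.get? i := by
  induction d with
  | nil => intro cs _; rfl
  | cons pr d ih =>
    intro cs h
    simp only [List.map_cons, List.mem_cons, not_or] at h
    rw [List.foldl_cons, ih _ h.2]
    by_cases hp : pr.1 ∈ allowed
    · simp [pvStepItem, hp, PySem.Dict.modify, PySem.Dict.get?_insert, h.1]
    · simp [pvStepItem, hp]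

-- effect at key i of B's fold over one profile's item dict (keys of d distinct, i allowed)
theorem pv_get?_foldl_stepItem (allowed : List String) (d : List (String × List (String × String))) (i : String) (hi : i ∈ allowed) :
    ∀ cs : PySem.Dict String (PySem.Dict String Int), (d.map Prod.fst).Nodup →
    (d.foldl (pvStepItem allowed) cs).get? i =
      match (PySem.Dict.mk d).get? i with
      | none => cs.get? i
      | some info => some ((cs.getD i PySem.Dict.empty).modify ((PySem.Dict.mk info).getD "estado" "") 0 (· + 1)) := by
  induction d with
  | nil => intro cs _; rfl
  | cons pr d ih =>
    obtain ⟨k, w⟩ := pr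
    intro cs hnd
    simp only [List.map_cons, List.nodup_cons] at hnd
    by_cases hip : (k, w).1 = i
    · rw [List.foldl_cons, pv_get?_foldl_stepItem_not_mem allowed d i _ (hip ▸ hnd.1)]
      simp only at hip
      subst hip
      simp [pvStepItem, hi, PySem.Dict.modify, PySem.Dict.get?_insert_self, PySem.Dict.get?_mk_cons]
    · have hne : i ≠ k := fun h => hip h.symm
      have key1 : (pvStepItem allowed cs (k, w)).get? i = cs.get? i := by
        by_cases hp : k ∈ allowed <;>
          simp [pvStepItem, hp, PySem.Dict.modify, PySem.Dict.get?_insert, hne]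
      have key2 : (pvStepItem allowed cs (k, w)).getD i PySem.Dict.empty = cs.getD i PySem.Dict.empty := by
        by_cases hp : k ∈ allowed <;>
          simp [pvStepItem, hp, PySem.Dict.modify, PySem.Dict.getD_insert, hne]
      rw [List.foldl_cons, ih _ hnd.2, key1, key2, PySem.Dict.get?_mk_cons]
      simp [hip]

-- effect at key i of B's whole pass over the profiles
theorem pv_get?_foldl_stepProf (s i : String) (allowed : List String) (hi : i ∈ allowed) :
    ∀ (ps : List (List (String × List (String × List (String × List (String × String)))))) (cs : PySem.Dict String (PySem.Dict String Int)),
    (∀ p ∈ ps, ∀ ec, (PySem.Dict.mk p).get? "estado_curricular" = some ec → ∀ d, (PySem.Dict.mk ec).get? s = some d → (d.map Prod.fst).Nodup) →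
    (ps.foldl (pvStepProf s allowed) cs).get? i =
      match ps.filterMap (pvContrib s i) with
      | [] => cs.get? i
      | l => some (l.foldl (fun c st => c.modify st 0 (· + 1)) (cs.getD i PySem.Dict.empty)) := by
  intro ps
  induction ps with
  | nil => intro cs _; rfl
  | cons p ps ih =>
    intro cs hnd
    have hhd := hnd p (List.mem_cons_self ..)
    have htl : ∀ p' ∈ ps, ∀ ec, (PySem.Dict.mk p').get? "estado_curricular" = some ec → ∀ d, (PySem.Dict.mk ec).get? s = some d → (d.map Prod.fst).Nodup :=
      fun p' hp' => hnd p' (List.mem_cons_of_mem _ hp')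
    simp only [List.foldl_cons, List.filterMap_cons]
    cases h1 : (PySem.Dict.mk p).get? "estado_curricular" with
    | none =>
      have hstep : pvStepProf s allowed cs p = cs := by simp [pvStepProf, h1]
      rw [hstep, ih cs htl]
      simp [pvContrib, h1]
    | some ec =>
      cases h2 : (PySem.Dict.mk ec).get? s with
      | none =>
        have hstep : pvStepProf s allowed cs p = cs := by simp [pvStepProf, h1, h2]
        rw [hstep, ih cs htl]
        simp [pvContrib, h1, h2]
      | some d =>
        have hstep : pvStepProf s allowed cs p = d.foldl (pvStepItem allowed) cs := by
          simp [pvStepProf, h1, h2]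
        have hd := hhd ec h1 d h2
        have hL1 := pv_get?_foldl_stepItem allowed d i hi cs hd
        cases h3 : (PySem.Dict.mk d).get? i with
        | none =>
          rw [h3] at hL1
          have hgD : (d.foldl (pvStepItem allowed) cs).getD i PySem.Dict.empty = cs.getD i PySem.Dict.empty := by
            rw [PySem.Dict.getD_eq_get?_getD, PySem.Dict.getD_eq_get?_getD, hL1]
          rw [hstep, ih _ htl]
          have hc : pvContrib s i p = none := by simp [pvContrib, h1, h2, h3]
          rw [hc]
          cases hl : ps.filterMap (pvContrib s i) with
          | nil => simpa [hl] using hL1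
          | cons a l => simp [hgD]
        | some info =>
          rw [h3] at hL1
          have hgD : (d.foldl (pvStepItem allowed) cs).getD i PySem.Dict.empty
              = (cs.getD i PySem.Dict.empty).modify ((PySem.Dict.mk info).getD "estado" "") 0 (· + 1) := by
            rw [PySem.Dict.getD_eq_get?_getD, hL1]; rfl
          rw [hstep, ih _ htl]
          have hc : pvContrib s i p = some ((PySem.Dict.mk info).getD "estado" "") := by
            simp [pvContrib, h1, h2, h3]
          rw [hc]
          cases hl : ps.filterMap (pvContrib s i) with
          | nil => simpa [hl] using hL1
          | cons a l => simp [hgD]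

-- at an allowed item i, B's counter dict holds exactly Counter of A's states list (or no entry)
theorem pv_get?_countersB (profiles : List (List (String × List (String × List (String × List (String × String)))))) (s i : String) (allowed : List String)
    (hnd : ∀ p ∈ profiles, ∀ ec, (PySem.Dict.mk p).get? "estado_curricular" = some ec → ∀ d, (PySem.Dict.mk ec).get? s = some d → (d.map Prod.fst).Nodup)
    (hi : i ∈ allowed) :
    (pvCountersB profiles s allowed).get? i =
      match pvStatesA profiles s i with
      | [] => none
      | l => some (PySem.Dict.counter l) := by
  unfold pvCountersB
  rw [pv_get?_foldl_stepProf s i allowed hi profiles PySem.Dict.empty hnd, pvStatesA_eq_filterMap]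
  cases hl : profiles.filterMap (pvContrib s i) with
  | nil => rfl
  | cons a l => simp [PySem.Dict.counter]

-- A's guarded insert loop over distinct fresh keys produces the corresponding filterMap
theorem pv_items_foldl_insert_guard {nu : Type} (l : List String) (q : String → Prop) [DecidablePred q] (v : String → nu) :
    ∀ (dic : PySem.Dict String nu), l.Nodup → (∀ i ∈ l, dic.contains i = false) →
    (l.foldl (fun dd i => if q i then dd.insert i (v i) else dd) dic).items
      = dic.items ++ l.filterMap (fun i => if q i then some (i, v i) else none) := by
  induction l with
  | nil => intro dic _ _; simp
  | cons x l ih =>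
    intro dic hnd hfresh
    simp only [List.nodup_cons] at hnd
    have hxl : ∀ i ∈ l, i ≠ x := fun i hil he => hnd.1 (he ▸ hil)
    by_cases hq : q x
    · have hfresh' : ∀ i ∈ l, (dic.insert x (v x)).contains i = false := by
        intro i hil
        simp [PySem.Dict.contains_insert, hxl i hil, hfresh i (List.mem_cons_of_mem _ hil)]
      rw [List.foldl_cons, if_pos hq, ih _ hnd.2 hfresh',
        PySem.Dict.items_insert_of_not_contains _ _ (hfresh x (List.mem_cons_self ..)),
        List.filterMap_cons]
      simp [hq]
    · rw [List.foldl_cons, if_neg hq, ih _ hnd.2 (fun i hil => hfresh i (List.mem_cons_of_mem _ hil)),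
        List.filterMap_cons]
      simp [hq]

theorem pv_filterMap_congr {a b : Type} (l : List a) (f g : a → Option b) (h : ∀ x ∈ l, f x = g x) :
    l.filterMap f = l.filterMap g := by
  induction l with
  | nil => rfl
  | cons x l ih =>
    simp only [List.filterMap_cons, h x (List.mem_cons_self ..)]
    rw [ih (fun y hy => h y (List.mem_cons_of_mem _ hy))]

theorem pvNodupStr_iff (l : List String) : pvNodupStr l = true ↔ l.Nodup := by
  induction l with
  | nil => simp [pvNodupStr]
  | cons x xs ih => simp [pvNodupStr, List.nodup_cons, ih]

-- the first clause of pvPreB, read back as the Nodup facts the proof uses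
theorem pvPre_nodup (profiles : List (List (String × List (String × List (String × List (String × String))))))
    (h : Pre_analyze_curricular_states profiles) :
    ∀ p ∈ profiles, (p.map Prod.fst).Nodup ∧ ∀ pr ∈ p, (pr.2.map Prod.fst).Nodup ∧
      ∀ q ∈ pr.2, (q.2.map Prod.fst).Nodup ∧ ∀ r ∈ q.2, (r.2.map Prod.fst).Nodup := by
  have h1 := (Bool.and_eq_true ..|>.mp h).1
  simp only [List.all_eq_true, Bool.and_eq_true, pvNodupStr_iff] at h1
  intro p hp
  refine ⟨(h1 p hp).1, fun pr hpr => ⟨((h1 p hp).2 pr hpr).1, fun q hq => ⟨(((h1 p hp).2 pr hpr).2 q hq).1, fun r hr => (((h1 p hp).2 pr hpr).2 q hq).2 r hr⟩⟩⟩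

-- per-subject equality of the two inner results
theorem pvInnerA_eq (profiles : List (List (String × List (String × List (String × List (String × String)))))) (s : String)
    (hpre : ∀ p ∈ profiles, (p.map Prod.fst).Nodup ∧ ∀ pr ∈ p, (pr.2.map Prod.fst).Nodup ∧
      ∀ q ∈ pr.2, (q.2.map Prod.fst).Nodup ∧ ∀ r ∈ q.2, (r.2.map Prod.fst).Nodup)
    (p0 : List (String × List (String × List (String × List (String × String))))) (rest : List (List (String × List (String × List (String × List (String × String))))))
    (hps : profiles = p0 :: rest) (ec0 : List (String × List (String × List (String × String)))) (hec0 : (PySem.Dict.mk p0).get? "estado_curricular" = some ec0) :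
    pvInnerA profiles s =
      (((PySem.Dict.mk ec0).getD s []).map Prod.fst).filterMap
        (fun i => ((pvCountersB profiles s (((PySem.Dict.mk ec0).getD s []).map Prod.fst)).get? i).map (fun c => (i, c.items))) := by
  subst hps
  have hnd2 : ∀ p ∈ p0 :: rest, ∀ ec, (PySem.Dict.mk p).get? "estado_curricular" = some ec →
      ∀ d, (PySem.Dict.mk ec).get? s = some d → (d.map Prod.fst).Nodup := by
    intro p hp ec hec d hd
    have hmem : ("estado_curricular", ec) ∈ p := PySem.Dict.mem_items_of_get?_eq_some _ hec
    have hmem2 : (s, d) ∈ ec := PySem.Dict.mem_items_of_get?_eq_some _ hd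
    exact (((hpre p hp).2 _ hmem).2 _ hmem2).1
  have hndallowed : ((((PySem.Dict.mk ec0)).getD s []).map Prod.fst).Nodup := by
    cases hs : (PySem.Dict.mk ec0).get? s with
    | none => simp [PySem.Dict.getD_of_get?_eq_none _ _ hs]
    | some d0 =>
      rw [PySem.Dict.getD_of_get?_eq_some _ _ hs]
      have hmem : ("estado_curricular", ec0) ∈ p0 := PySem.Dict.mem_items_of_get?_eq_some _ hec0
      have hmem2 : (s, d0) ∈ ec0 := PySem.Dict.mem_items_of_get?_eq_some _ hs
      exact (((hpre p0 (List.mem_cons_self ..)).2 _ hmem).2 _ hmem2).1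
  simp only [pvInnerA, hec0]
  rw [pv_items_foldl_insert_guard (((PySem.Dict.mk ec0).getD s []).map Prod.fst)
        (fun i => pvStatesA (p0 :: rest) s i ≠ [])
        (fun i => (PySem.Dict.counter (pvStatesA (p0 :: rest) s i)).items)
        PySem.Dict.empty hndallowed (fun i _ => by simp [PySem.Dict.contains_empty])]
  have hempty : (PySem.Dict.empty : PySem.Dict String (List (String × Int))).items = [] := rfl
  rw [hempty, List.nil_append]
  apply pv_filterMap_congr
  intro i hi
  rw [pv_get?_countersB (p0 :: rest) s i _ hnd2 hi]
  cases hl : pvStatesA (p0 :: rest) s i with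
  | nil => simp
  | cons a l => simp

-- A's three subject results are assembled into an insertion-ordered dict of distinct keys
theorem pv_assembly (profiles : List (List (String × List (String × List (String × List (String × String)))))) :
    analyze_curricular_states profiles =
      [("matematicas", pvInnerA profiles "matematicas"), ("lengua", pvInnerA profiles "lengua"),
       ("ciencias", pvInnerA profiles "ciencias")] := by
  unfold analyze_curricular_states
  rw [PySem.Dict.items_foldl_insert_fresh (["matematicas", "lengua", "ciencias"]) (fun a => a)
        (fun a => pvInnerA profiles a) PySem.Dict.empty
        (fun a _ => by simp [PySem.Dict.contains_empty]) (by decide)]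
  rfl

-- ===== VERDICT (by name: the statement is the Claim_ definition above) =====
theorem analyze_curricular_states_spec : Claim_equal_analyze_curricular_states := by
  intro profiles _ hpre
  unfold Spec_analyze_curricular_states
  have h1 := pvPre_nodup profiles hpre
  rw [pv_assembly]
  cases profiles with
  | nil => rfl
  | cons p0 rest =>
    cases hec0 : (PySem.Dict.mk p0).get? "estado_curricular" with
    | none =>
      have hA : ∀ s, pvInnerA (p0 :: rest) s = [] := fun s => by simp [pvInnerA, hec0]
      simp [analyze_curricular_states_alt, hec0, hA]
    | some ec0 =>
      simp only [analyze_curricular_states_alt, hec0, List.map]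
      rw [pvInnerA_eq (p0 :: rest) "matematicas" h1 p0 rest rfl ec0 hec0,
          pvInnerA_eq (p0 :: rest) "lengua" h1 p0 rest rfl ec0 hec0,
          pvInnerA_eq (p0 :: rest) "ciencias" h1 p0 rest rfl ec0 hec0]
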